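-- pv_equiv track=rewrite | github.com/NickCarducci/NAO-soccer | 9_Recognize/announce.py | parse_object_label
-- ===== SOURCE A (Python) =====
-- OBJECT_PREFIX_MESSAGES = {
--     "cube-": "I see a face of the cube.",
--     "square-": "I see a square face.",
--     "page-shape-": "I see a page with a shape.",
--     "page-": "I see a page.",
--     "book-": "I see a book.",
--     "card-": "I see a card.",
--     "paper-": "I see a sheet of paper.",
--     "house-": "I see a side of the house.",
--     "car-": "I see a side of the car.",
--     "bottle-": "I see a bottle.",
--     "can-": "I see a can.",
--     "cup-": "I see a cup.",
-- }
--
-- SIDES = ["front", "back", "left", "right", "top", "bottom"]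
--
-- def parse_object_label(object_name):
--     """
--     Returns (prefix, side, suffix, message)
--     """
--     # Sort prefixes by length descending to prefer more specific matches
--     for prefix in sorted(OBJECT_PREFIX_MESSAGES.keys(), key=len, reverse=True):
--         message = OBJECT_PREFIX_MESSAGES[prefix]
--         if object_name.startswith(prefix):
--             suffix = object_name[len(prefix):]
--             for side in SIDES:
--                 if suffix.startswith(side):
--                     return prefix, side, suffix, message
--             return prefix, None, suffix, message
--     return None, None, object_name, "I found an object."
-- ===== SOURCE B (Python) =====
-- OBJECT_PREFIX_MESSAGES = {
--     "cube-": "I see a face of the cube.",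
--     "square-": "I see a square face.",
--     "page-shape-": "I see a page with a shape.",
--     "page-": "I see a page.",
--     "book-": "I see a book.",
--     "card-": "I see a card.",
--     "paper-": "I see a sheet of paper.",
--     "house-": "I see a side of the house.",
--     "car-": "I see a side of the car.",
--     "bottle-": "I see a bottle.",
--     "can-": "I see a can.",
--     "cup-": "I see a cup.",
-- }
--
-- SIDES = ["front", "back", "left", "right", "top", "bottom"]
--
-- def parse_object_label(object_name):
--     """
--     Returns (prefix, side, suffix, message)
--     """
--     # One linear pass: keep the longest matching prefix (no per-call sort).
--     best = None  # (prefix, message)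
--     for key, msg in OBJECT_PREFIX_MESSAGES.items():
--         if object_name.startswith(key) and (best is None or len(key) > len(best[0])):
--             best = (key, msg)
--     if best is None:
--         return None, None, object_name, "I found an object."
--     prefix, message = best
--     suffix = object_name[len(prefix):]
--     side = next((s for s in SIDES if suffix.startswith(s)), None)
--     return prefix, side, suffix, message
-- ===== Notes on version B (the rewrite author's own statement) =====
-- stated objective: simpler
-- what changed: B drops A's per-call length-descending sort of the prefix table and instead does one linear fold over the dict items keeping the strictly longest matching prefix, then extracts side/suffix once after the loop.
import Mathlib
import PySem

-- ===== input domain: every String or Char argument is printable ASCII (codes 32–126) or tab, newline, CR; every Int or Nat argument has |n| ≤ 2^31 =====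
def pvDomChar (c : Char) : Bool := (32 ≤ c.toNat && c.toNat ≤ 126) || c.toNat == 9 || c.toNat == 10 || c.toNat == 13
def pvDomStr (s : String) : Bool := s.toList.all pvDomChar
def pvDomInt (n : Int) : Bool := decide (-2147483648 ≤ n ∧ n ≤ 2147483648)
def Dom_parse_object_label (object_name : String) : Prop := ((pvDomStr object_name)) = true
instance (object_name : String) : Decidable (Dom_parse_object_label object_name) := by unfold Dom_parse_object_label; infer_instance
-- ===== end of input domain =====

-- B replaces A's per-call length-descending sort of the prefix table by a single linear
-- fold keeping the strictly longest matching prefix (objective: simpler/alternative).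

-- ===== PORT A =====
def OBJECT_PREFIX_MESSAGES : PySem.Dict String String :=
  PySem.Dict.ofList [
    ("cube-", "I see a face of the cube."),
    ("square-", "I see a square face."),
    ("page-shape-", "I see a page with a shape."),
    ("page-", "I see a page."),
    ("book-", "I see a book."),
    ("card-", "I see a card."),
    ("paper-", "I see a sheet of paper."),
    ("house-", "I see a side of the house."),
    ("car-", "I see a side of the car."),
    ("bottle-", "I see a bottle."),
    ("can-", "I see a can."),
    ("cup-", "I see a cup.")]

def SIDES : List String := ["front", "back", "left", "right", "top", "bottom"]

-- A's inner 'for side in SIDES: … return …' loop (returns the whole result tuple, as A does)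
def pvSideLoopA (pre suffix message : String) : List String → Option String × Option String × String × String
  | [] => (some pre, none, suffix, message)
  | side :: rest =>
    if PySem.Str.startswith suffix side then (some pre, some side, suffix, message)
    else pvSideLoopA pre suffix message rest

-- A's outer 'for prefix in sorted(…)' loop
def pvPrefixLoopA (object_name : String) : List String → Option String × Option String × String × String
  | [] => (none, none, object_name, "I found an object.")
  | p :: rest =>
    -- OBJECT_PREFIX_MESSAGES[p]: the key always comes from the dict, so get? is some; "" is never used
    let message := (PySem.Dict.get? OBJECT_PREFIX_MESSAGES p).getD ""
    if PySem.Str.startswith object_name p then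
      let suffix := PySem.Str.slice object_name (some (PySem.Str.len p)) none
      pvSideLoopA p suffix message SIDES
    else pvPrefixLoopA object_name rest

def parse_object_label (object_name : String) : Option String × Option String × String × String :=
  pvPrefixLoopA object_name
    (PySem.List.sorted (PySem.Dict.keys OBJECT_PREFIX_MESSAGES) (fun k => PySem.Str.len k) true)

-- ===== PORT B =====
-- B's loop body: take kv iff it matches and is strictly longer than the held best
def pvStep (object_name : String) (best : Option (String × String)) (kv : String × String) :
    Option (String × String) :=
  if PySem.Str.startswith object_name kv.1 &&
     (match best with
      | none => true
      | some b => decide (PySem.Str.len kv.1 > PySem.Str.len b.1))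
  then some kv else best

-- B's single pass: keep the matching key of strictly greatest length
def pvFoldBest (object_name : String) (l : List (String × String))
    (init : Option (String × String)) : Option (String × String) :=
  l.foldl (pvStep object_name) init

def parse_object_label_alt (object_name : String) : Option String × Option String × String × String :=
  match pvFoldBest object_name (PySem.Dict.items OBJECT_PREFIX_MESSAGES) none with
  | none => (none, none, object_name, "I found an object.")
  | some (p, message) =>
    let suffix := PySem.Str.slice object_name (some (PySem.Str.len p)) none
    let side := SIDES.find? (fun s => PySem.Str.startswith suffix s)
    (some p, side, suffix, message)

-- ===== PRECONDITION & SPEC =====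
def Spec_parse_object_label (object_name : String) (out : Option String × Option String × String × String) : Prop := out = parse_object_label_alt object_name
instance (object_name : String) (out : Option String × Option String × String × String) : Decidable (Spec_parse_object_label object_name out) := by unfold Spec_parse_object_label; infer_instance

-- ===== CLAIM (what is proved, stated in full; the proofs are below) =====
def Claim_equal_parse_object_label : Prop := ∀ (object_name : String), Dom_parse_object_label object_name → Spec_parse_object_label object_name (parse_object_label object_name)

-- ===== LEMMAS AND PROOFS =====

-- A's inner loop is a find? over SIDES (this is what B computes after its fold)
theorem pvSideLoopA_eq (pre suffix message : String) (l : List String) :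
    pvSideLoopA pre suffix message l =
      (some pre, l.find? (fun s => PySem.Str.startswith suffix s), suffix, message) := by
  induction l with
  | nil => simp [pvSideLoopA]
  | cons h t ih =>
    by_cases hs : PySem.Str.startswith suffix h
    · simp only [PySem.Str.startswith_eq] at hs
      simp [pvSideLoopA, hs]
    · simp only [Bool.not_eq_true, PySem.Str.startswith_eq] at hs
      simp [pvSideLoopA, hs, ih]

theorem pvStep_false {s : String} {kv : String × String} (best : Option (String × String))
    (h : PySem.Str.startswith s kv.1 = false) : pvStep s best kv = best := by
  simp only [PySem.Str.startswith_eq] at h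
  simp [pvStep, h]

theorem pvStep_le {s : String} {kv b : String × String}
    (h : PySem.Str.len kv.1 ≤ PySem.Str.len b.1) : pvStep s (some b) kv = some b := by
  simp only [PySem.Str.len_eq] at h
  simp [pvStep]
  intro _ hlt
  exact absurd hlt (by simp only [← String.length_toList] at h ⊢; omega)

theorem pvStep_none_true {s : String} {kv : String × String}
    (h : PySem.Str.startswith s kv.1 = true) : pvStep s none kv = some kv := by
  simp only [PySem.Str.startswith_eq] at h
  simp [pvStep, h]

theorem pvStep_lt {s : String} {kv b : String × String}
    (h : PySem.Str.startswith s kv.1 = true) (h2 : PySem.Str.len b.1 < PySem.Str.len kv.1) :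
    pvStep s (some b) kv = some kv := by
  simp only [PySem.Str.startswith_eq] at h
  simp only [PySem.Str.len_eq] at h2
  simp [pvStep, h]
  intro hc
  exact absurd hc (by simp only [← String.length_toList] at h2 ⊢; omega)

theorem pvFoldBest_cons (s : String) (kv : String × String) (t : List (String × String))
    (init : Option (String × String)) :
    pvFoldBest s (kv :: t) init = pvFoldBest s t (pvStep s init kv) := rfl

theorem pvFoldBest_append (s : String) (l1 l2 : List (String × String))
    (init : Option (String × String)) :
    pvFoldBest s (l1 ++ l2) init = pvFoldBest s l2 (pvFoldBest s l1 init) := by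
  simp [pvFoldBest, List.foldl_append]

-- every entry of l either fails to match or is shorter than n ⇒ the fold's best stays shorter than n
theorem pvFoldBest_lt (s : String) (n : Int) (l : List (String × String)) :
    ∀ (init : Option (String × String)),
    (∀ kv ∈ l, PySem.Str.startswith s kv.1 = false ∨ PySem.Str.len kv.1 < n) →
    (∀ b, init = some b → PySem.Str.len b.1 < n) →
    ∀ b, pvFoldBest s l init = some b → PySem.Str.len b.1 < n := by
  induction l with
  | nil => intro init _ hinit b hb; exact hinit b hb
  | cons kv t ih =>
    intro init hl hinit b hb
    rw [pvFoldBest_cons] at hb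
    refine ih _ (fun x hx => hl x (by simp [hx])) ?_ b hb
    intro b' hb'
    rcases hl kv (by simp) with h | h
    · rw [pvStep_false init h] at hb'; exact hinit b' hb'
    · unfold pvStep at hb'
      split_ifs at hb' with hc
      · cases hb'; exact h
      · exact hinit b' hb'

-- every entry of l either fails to match or is no longer than the held best ⇒ the best is final
theorem pvFoldBest_fix (s : String) (b : String × String) (l : List (String × String))
    (h : ∀ kv ∈ l, PySem.Str.startswith s kv.1 = false ∨ PySem.Str.len kv.1 ≤ PySem.Str.len b.1) :
    pvFoldBest s l (some b) = some b := by
  induction l with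
  | nil => rfl
  | cons kv t ih =>
    rw [pvFoldBest_cons]
    have hstep : pvStep s (some b) kv = some b := by
      rcases h kv (by simp) with h0 | h0
      · exact pvStep_false _ h0
      · exact pvStep_le h0
    rw [hstep]
    exact ih (fun x hx => h x (by simp [hx]))

-- the decisive step: left of p only non-matches or strictly shorter keys, right of p only
-- non-matches or no-longer keys, p matches ⇒ the fold returns (p, m)
theorem pvFoldBest_split (s : String) (pre post : List (String × String)) (p m : String)
    (hp : PySem.Str.startswith s p = true)
    (hpre : ∀ kv ∈ pre, PySem.Str.startswith s kv.1 = false ∨ PySem.Str.len kv.1 < PySem.Str.len p)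
    (hpost : ∀ kv ∈ post, PySem.Str.startswith s kv.1 = false ∨ PySem.Str.len kv.1 ≤ PySem.Str.len p) :
    pvFoldBest s (pre ++ (p, m) :: post) none = some (p, m) := by
  rw [pvFoldBest_append, pvFoldBest_cons]
  have hstep : pvStep s (pvFoldBest s pre none) (p, m) = some (p, m) := by
    rcases hb : pvFoldBest s pre none with _ | b
    · exact pvStep_none_true hp
    · exact pvStep_lt hp (pvFoldBest_lt s (PySem.Str.len p) pre none hpre (by simp) b hb)
  rw [hstep]
  exact pvFoldBest_fix s (p, m) post hpost


-- if nothing in l matches, the fold keeps its accumulator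
theorem pvFoldBest_id (s : String) (l : List (String × String)) (init : Option (String × String))
    (h : ∀ kv ∈ l, PySem.Str.startswith s kv.1 = false) :
    pvFoldBest s l init = init := by
  induction l generalizing init with
  | nil => rfl
  | cons kv t ih =>
    rw [pvFoldBest_cons, pvStep_false init (h kv (by simp))]
    exact ih _ (fun x hx => h x (by simp [hx]))

theorem pvHsorted : PySem.List.sorted (PySem.Dict.keys OBJECT_PREFIX_MESSAGES)
    (fun k => PySem.Str.len k) true =
    ["page-shape-", "square-", "bottle-", "paper-", "house-", "cube-", "page-", "book-", "card-", "car-", "can-", "cup-"] := by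
  decide

theorem pvHitems : PySem.Dict.items OBJECT_PREFIX_MESSAGES = [("cube-", "I see a face of the cube."), ("square-", "I see a square face."), ("page-shape-", "I see a page with a shape."), ("page-", "I see a page."), ("book-", "I see a book."), ("card-", "I see a card."), ("paper-", "I see a sheet of paper."), ("house-", "I see a side of the house."), ("car-", "I see a side of the car."), ("bottle-", "I see a bottle."), ("can-", "I see a can."), ("cup-", "I see a cup.")] := rfl

-- ===== VERDICT (by name: the statement is the Claim_ definition above) =====
set_option maxHeartbeats 2000000 in
theorem parse_object_label_spec : Claim_equal_parse_object_label := by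
  intro s _
  unfold Spec_parse_object_label
  by_cases h1 : PySem.Str.startswith s "page-shape-" = true
  · have hb : pvFoldBest s (PySem.Dict.items OBJECT_PREFIX_MESSAGES) none = some ("page-shape-", "I see a page with a shape.") := by
      rw [pvHitems]
      exact pvFoldBest_split s [("cube-", "I see a face of the cube."), ("square-", "I see a square face.")] [("page-", "I see a page."), ("book-", "I see a book."), ("card-", "I see a card."), ("paper-", "I see a sheet of paper."), ("house-", "I see a side of the house."), ("car-", "I see a side of the car."), ("bottle-", "I see a bottle."), ("can-", "I see a can."), ("cup-", "I see a cup.")] "page-shape-" "I see a page with a shape." h1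
        (by intro kv hkv; fin_cases hkv <;> first | exact Or.inl ‹_› | (right; decide))
        (by intro kv hkv; fin_cases hkv <;> first | exact Or.inl ‹_› | (right; decide))
    have hm : PySem.Dict.get? OBJECT_PREFIX_MESSAGES "page-shape-" = some "I see a page with a shape." := rfl
    have h1c := h1; simp at h1c
    unfold parse_object_label parse_object_label_alt
    rw [pvHsorted, hb]
    simp [pvPrefixLoopA, pvSideLoopA_eq, hm, h1c]
  by_cases h2 : PySem.Str.startswith s "square-" = true
  · simp only [Bool.not_eq_true] at h1
    have hb : pvFoldBest s (PySem.Dict.items OBJECT_PREFIX_MESSAGES) none = some ("square-", "I see a square face.") := by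
      rw [pvHitems]
      exact pvFoldBest_split s [("cube-", "I see a face of the cube.")] [("page-shape-", "I see a page with a shape."), ("page-", "I see a page."), ("book-", "I see a book."), ("card-", "I see a card."), ("paper-", "I see a sheet of paper."), ("house-", "I see a side of the house."), ("car-", "I see a side of the car."), ("bottle-", "I see a bottle."), ("can-", "I see a can."), ("cup-", "I see a cup.")] "square-" "I see a square face." h2
        (by intro kv hkv; fin_cases hkv <;> first | exact Or.inl ‹_› | (right; decide))
        (by intro kv hkv; fin_cases hkv <;> first | exact Or.inl ‹_› | (right; decide))
    have hm : PySem.Dict.get? OBJECT_PREFIX_MESSAGES "square-" = some "I see a square face." := rfl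
    have h1c := h1; simp at h1c
    have h2c := h2; simp at h2c
    unfold parse_object_label parse_object_label_alt
    rw [pvHsorted, hb]
    simp [pvPrefixLoopA, pvSideLoopA_eq, hm, h1c, h2c]
  by_cases h3 : PySem.Str.startswith s "bottle-" = true
  · simp only [Bool.not_eq_true] at h1 h2
    have hb : pvFoldBest s (PySem.Dict.items OBJECT_PREFIX_MESSAGES) none = some ("bottle-", "I see a bottle.") := by
      rw [pvHitems]
      exact pvFoldBest_split s [("cube-", "I see a face of the cube."), ("square-", "I see a square face."), ("page-shape-", "I see a page with a shape."), ("page-", "I see a page."), ("book-", "I see a book."), ("card-", "I see a card."), ("paper-", "I see a sheet of paper."), ("house-", "I see a side of the house."), ("car-", "I see a side of the car.")] [("can-", "I see a can."), ("cup-", "I see a cup.")] "bottle-" "I see a bottle." h3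
        (by intro kv hkv; fin_cases hkv <;> first | exact Or.inl ‹_› | (right; decide))
        (by intro kv hkv; fin_cases hkv <;> first | exact Or.inl ‹_› | (right; decide))
    have hm : PySem.Dict.get? OBJECT_PREFIX_MESSAGES "bottle-" = some "I see a bottle." := rfl
    have h1c := h1; simp at h1c
    have h2c := h2; simp at h2c
    have h3c := h3; simp at h3c
    unfold parse_object_label parse_object_label_alt
    rw [pvHsorted, hb]
    simp [pvPrefixLoopA, pvSideLoopA_eq, hm, h1c, h2c, h3c]
  by_cases h4 : PySem.Str.startswith s "paper-" = true
  · simp only [Bool.not_eq_true] at h1 h2 h3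
    have hb : pvFoldBest s (PySem.Dict.items OBJECT_PREFIX_MESSAGES) none = some ("paper-", "I see a sheet of paper.") := by
      rw [pvHitems]
      exact pvFoldBest_split s [("cube-", "I see a face of the cube."), ("square-", "I see a square face."), ("page-shape-", "I see a page with a shape."), ("page-", "I see a page."), ("book-", "I see a book."), ("card-", "I see a card.")] [("house-", "I see a side of the house."), ("car-", "I see a side of the car."), ("bottle-", "I see a bottle."), ("can-", "I see a can."), ("cup-", "I see a cup.")] "paper-" "I see a sheet of paper." h4
        (by intro kv hkv; fin_cases hkv <;> first | exact Or.inl ‹_› | (right; decide))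
        (by intro kv hkv; fin_cases hkv <;> first | exact Or.inl ‹_› | (right; decide))
    have hm : PySem.Dict.get? OBJECT_PREFIX_MESSAGES "paper-" = some "I see a sheet of paper." := rfl
    have h1c := h1; simp at h1c
    have h2c := h2; simp at h2c
    have h3c := h3; simp at h3c
    have h4c := h4; simp at h4c
    unfold parse_object_label parse_object_label_alt
    rw [pvHsorted, hb]
    simp [pvPrefixLoopA, pvSideLoopA_eq, hm, h1c, h2c, h3c, h4c]
  by_cases h5 : PySem.Str.startswith s "house-" = true
  · simp only [Bool.not_eq_true] at h1 h2 h3 h4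
    have hb : pvFoldBest s (PySem.Dict.items OBJECT_PREFIX_MESSAGES) none = some ("house-", "I see a side of the house.") := by
      rw [pvHitems]
      exact pvFoldBest_split s [("cube-", "I see a face of the cube."), ("square-", "I see a square face."), ("page-shape-", "I see a page with a shape."), ("page-", "I see a page."), ("book-", "I see a book."), ("card-", "I see a card."), ("paper-", "I see a sheet of paper.")] [("car-", "I see a side of the car."), ("bottle-", "I see a bottle."), ("can-", "I see a can."), ("cup-", "I see a cup.")] "house-" "I see a side of the house." h5
        (by intro kv hkv; fin_cases hkv <;> first | exact Or.inl ‹_› | (right; decide))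
        (by intro kv hkv; fin_cases hkv <;> first | exact Or.inl ‹_› | (right; decide))
    have hm : PySem.Dict.get? OBJECT_PREFIX_MESSAGES "house-" = some "I see a side of the house." := rfl
    have h1c := h1; simp at h1c
    have h2c := h2; simp at h2c
    have h3c := h3; simp at h3c
    have h4c := h4; simp at h4c
    have h5c := h5; simp at h5c
    unfold parse_object_label parse_object_label_alt
    rw [pvHsorted, hb]
    simp [pvPrefixLoopA, pvSideLoopA_eq, hm, h1c, h2c, h3c, h4c, h5c]
  by_cases h6 : PySem.Str.startswith s "cube-" = true
  · simp only [Bool.not_eq_true] at h1 h2 h3 h4 h5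
    have hb : pvFoldBest s (PySem.Dict.items OBJECT_PREFIX_MESSAGES) none = some ("cube-", "I see a face of the cube.") := by
      rw [pvHitems]
      exact pvFoldBest_split s [] [("square-", "I see a square face."), ("page-shape-", "I see a page with a shape."), ("page-", "I see a page."), ("book-", "I see a book."), ("card-", "I see a card."), ("paper-", "I see a sheet of paper."), ("house-", "I see a side of the house."), ("car-", "I see a side of the car."), ("bottle-", "I see a bottle."), ("can-", "I see a can."), ("cup-", "I see a cup.")] "cube-" "I see a face of the cube." h6
        (by intro kv hkv; fin_cases hkv <;> first | exact Or.inl ‹_› | (right; decide))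
        (by intro kv hkv; fin_cases hkv <;> first | exact Or.inl ‹_› | (right; decide))
    have hm : PySem.Dict.get? OBJECT_PREFIX_MESSAGES "cube-" = some "I see a face of the cube." := rfl
    have h1c := h1; simp at h1c
    have h2c := h2; simp at h2c
    have h3c := h3; simp at h3c
    have h4c := h4; simp at h4c
    have h5c := h5; simp at h5c
    have h6c := h6; simp at h6c
    unfold parse_object_label parse_object_label_alt
    rw [pvHsorted, hb]
    simp [pvPrefixLoopA, pvSideLoopA_eq, hm, h1c, h2c, h3c, h4c, h5c, h6c]
  by_cases h7 : PySem.Str.startswith s "page-" = true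
  · simp only [Bool.not_eq_true] at h1 h2 h3 h4 h5 h6
    have hb : pvFoldBest s (PySem.Dict.items OBJECT_PREFIX_MESSAGES) none = some ("page-", "I see a page.") := by
      rw [pvHitems]
      exact pvFoldBest_split s [("cube-", "I see a face of the cube."), ("square-", "I see a square face."), ("page-shape-", "I see a page with a shape.")] [("book-", "I see a book."), ("card-", "I see a card."), ("paper-", "I see a sheet of paper."), ("house-", "I see a side of the house."), ("car-", "I see a side of the car."), ("bottle-", "I see a bottle."), ("can-", "I see a can."), ("cup-", "I see a cup.")] "page-" "I see a page." h7
        (by intro kv hkv; fin_cases hkv <;> first | exact Or.inl ‹_› | (right; decide))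
        (by intro kv hkv; fin_cases hkv <;> first | exact Or.inl ‹_› | (right; decide))
    have hm : PySem.Dict.get? OBJECT_PREFIX_MESSAGES "page-" = some "I see a page." := rfl
    have h1c := h1; simp at h1c
    have h2c := h2; simp at h2c
    have h3c := h3; simp at h3c
    have h4c := h4; simp at h4c
    have h5c := h5; simp at h5c
    have h6c := h6; simp at h6c
    have h7c := h7; simp at h7c
    unfold parse_object_label parse_object_label_alt
    rw [pvHsorted, hb]
    simp [pvPrefixLoopA, pvSideLoopA_eq, hm, h1c, h2c, h3c, h4c, h5c, h6c, h7c]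
  by_cases h8 : PySem.Str.startswith s "book-" = true
  · simp only [Bool.not_eq_true] at h1 h2 h3 h4 h5 h6 h7
    have hb : pvFoldBest s (PySem.Dict.items OBJECT_PREFIX_MESSAGES) none = some ("book-", "I see a book.") := by
      rw [pvHitems]
      exact pvFoldBest_split s [("cube-", "I see a face of the cube."), ("square-", "I see a square face."), ("page-shape-", "I see a page with a shape."), ("page-", "I see a page.")] [("card-", "I see a card."), ("paper-", "I see a sheet of paper."), ("house-", "I see a side of the house."), ("car-", "I see a side of the car."), ("bottle-", "I see a bottle."), ("can-", "I see a can."), ("cup-", "I see a cup.")] "book-" "I see a book." h8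
        (by intro kv hkv; fin_cases hkv <;> first | exact Or.inl ‹_› | (right; decide))
        (by intro kv hkv; fin_cases hkv <;> first | exact Or.inl ‹_› | (right; decide))
    have hm : PySem.Dict.get? OBJECT_PREFIX_MESSAGES "book-" = some "I see a book." := rfl
    have h1c := h1; simp at h1c
    have h2c := h2; simp at h2c
    have h3c := h3; simp at h3c
    have h4c := h4; simp at h4c
    have h5c := h5; simp at h5c
    have h6c := h6; simp at h6c
    have h7c := h7; simp at h7c
    have h8c := h8; simp at h8c
    unfold parse_object_label parse_object_label_alt
    rw [pvHsorted, hb]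
    simp [pvPrefixLoopA, pvSideLoopA_eq, hm, h1c, h2c, h3c, h4c, h5c, h6c, h7c, h8c]
  by_cases h9 : PySem.Str.startswith s "card-" = true
  · simp only [Bool.not_eq_true] at h1 h2 h3 h4 h5 h6 h7 h8
    have hb : pvFoldBest s (PySem.Dict.items OBJECT_PREFIX_MESSAGES) none = some ("card-", "I see a card.") := by
      rw [pvHitems]
      exact pvFoldBest_split s [("cube-", "I see a face of the cube."), ("square-", "I see a square face."), ("page-shape-", "I see a page with a shape."), ("page-", "I see a page."), ("book-", "I see a book.")] [("paper-", "I see a sheet of paper."), ("house-", "I see a side of the house."), ("car-", "I see a side of the car."), ("bottle-", "I see a bottle."), ("can-", "I see a can."), ("cup-", "I see a cup.")] "card-" "I see a card." h9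
        (by intro kv hkv; fin_cases hkv <;> first | exact Or.inl ‹_› | (right; decide))
        (by intro kv hkv; fin_cases hkv <;> first | exact Or.inl ‹_› | (right; decide))
    have hm : PySem.Dict.get? OBJECT_PREFIX_MESSAGES "card-" = some "I see a card." := rfl
    have h1c := h1; simp at h1c
    have h2c := h2; simp at h2c
    have h3c := h3; simp at h3c
    have h4c := h4; simp at h4c
    have h5c := h5; simp at h5c
    have h6c := h6; simp at h6c
    have h7c := h7; simp at h7c
    have h8c := h8; simp at h8c
    have h9c := h9; simp at h9c
    unfold parse_object_label parse_object_label_alt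
    rw [pvHsorted, hb]
    simp [pvPrefixLoopA, pvSideLoopA_eq, hm, h1c, h2c, h3c, h4c, h5c, h6c, h7c, h8c, h9c]
  by_cases h10 : PySem.Str.startswith s "car-" = true
  · simp only [Bool.not_eq_true] at h1 h2 h3 h4 h5 h6 h7 h8 h9
    have hb : pvFoldBest s (PySem.Dict.items OBJECT_PREFIX_MESSAGES) none = some ("car-", "I see a side of the car.") := by
      rw [pvHitems]
      exact pvFoldBest_split s [("cube-", "I see a face of the cube."), ("square-", "I see a square face."), ("page-shape-", "I see a page with a shape."), ("page-", "I see a page."), ("book-", "I see a book."), ("card-", "I see a card."), ("paper-", "I see a sheet of paper."), ("house-", "I see a side of the house.")] [("bottle-", "I see a bottle."), ("can-", "I see a can."), ("cup-", "I see a cup.")] "car-" "I see a side of the car." h10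
        (by intro kv hkv; fin_cases hkv <;> first | exact Or.inl ‹_› | (right; decide))
        (by intro kv hkv; fin_cases hkv <;> first | exact Or.inl ‹_› | (right; decide))
    have hm : PySem.Dict.get? OBJECT_PREFIX_MESSAGES "car-" = some "I see a side of the car." := rfl
    have h1c := h1; simp at h1c
    have h2c := h2; simp at h2c
    have h3c := h3; simp at h3c
    have h4c := h4; simp at h4c
    have h5c := h5; simp at h5c
    have h6c := h6; simp at h6c
    have h7c := h7; simp at h7c
    have h8c := h8; simp at h8c
    have h9c := h9; simp at h9c
    have h10c := h10; simp at h10c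
    unfold parse_object_label parse_object_label_alt
    rw [pvHsorted, hb]
    simp [pvPrefixLoopA, pvSideLoopA_eq, hm, h1c, h2c, h3c, h4c, h5c, h6c, h7c, h8c, h9c, h10c]
  by_cases h11 : PySem.Str.startswith s "can-" = true
  · simp only [Bool.not_eq_true] at h1 h2 h3 h4 h5 h6 h7 h8 h9 h10
    have hb : pvFoldBest s (PySem.Dict.items OBJECT_PREFIX_MESSAGES) none = some ("can-", "I see a can.") := by
      rw [pvHitems]
      exact pvFoldBest_split s [("cube-", "I see a face of the cube."), ("square-", "I see a square face."), ("page-shape-", "I see a page with a shape."), ("page-", "I see a page."), ("book-", "I see a book."), ("card-", "I see a card."), ("paper-", "I see a sheet of paper."), ("house-", "I see a side of the house."), ("car-", "I see a side of the car."), ("bottle-", "I see a bottle.")] [("cup-", "I see a cup.")] "can-" "I see a can." h11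
        (by intro kv hkv; fin_cases hkv <;> first | exact Or.inl ‹_› | (right; decide))
        (by intro kv hkv; fin_cases hkv <;> first | exact Or.inl ‹_› | (right; decide))
    have hm : PySem.Dict.get? OBJECT_PREFIX_MESSAGES "can-" = some "I see a can." := rfl
    have h1c := h1; simp at h1c
    have h2c := h2; simp at h2c
    have h3c := h3; simp at h3c
    have h4c := h4; simp at h4c
    have h5c := h5; simp at h5c
    have h6c := h6; simp at h6c
    have h7c := h7; simp at h7c
    have h8c := h8; simp at h8c
    have h9c := h9; simp at h9c
    have h10c := h10; simp at h10c
    have h11c := h11; simp at h11c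
    unfold parse_object_label parse_object_label_alt
    rw [pvHsorted, hb]
    simp [pvPrefixLoopA, pvSideLoopA_eq, hm, h1c, h2c, h3c, h4c, h5c, h6c, h7c, h8c, h9c, h10c, h11c]
  by_cases h12 : PySem.Str.startswith s "cup-" = true
  · simp only [Bool.not_eq_true] at h1 h2 h3 h4 h5 h6 h7 h8 h9 h10 h11
    have hb : pvFoldBest s (PySem.Dict.items OBJECT_PREFIX_MESSAGES) none = some ("cup-", "I see a cup.") := by
      rw [pvHitems]
      exact pvFoldBest_split s [("cube-", "I see a face of the cube."), ("square-", "I see a square face."), ("page-shape-", "I see a page with a shape."), ("page-", "I see a page."), ("book-", "I see a book."), ("card-", "I see a card."), ("paper-", "I see a sheet of paper."), ("house-", "I see a side of the house."), ("car-", "I see a side of the car."), ("bottle-", "I see a bottle."), ("can-", "I see a can.")] [] "cup-" "I see a cup." h12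
        (by intro kv hkv; fin_cases hkv <;> first | exact Or.inl ‹_› | (right; decide))
        (by intro kv hkv; fin_cases hkv <;> first | exact Or.inl ‹_› | (right; decide))
    have hm : PySem.Dict.get? OBJECT_PREFIX_MESSAGES "cup-" = some "I see a cup." := rfl
    have h1c := h1; simp at h1c
    have h2c := h2; simp at h2c
    have h3c := h3; simp at h3c
    have h4c := h4; simp at h4c
    have h5c := h5; simp at h5c
    have h6c := h6; simp at h6c
    have h7c := h7; simp at h7c
    have h8c := h8; simp at h8c
    have h9c := h9; simp at h9c
    have h10c := h10; simp at h10c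
    have h11c := h11; simp at h11c
    have h12c := h12; simp at h12c
    unfold parse_object_label parse_object_label_alt
    rw [pvHsorted, hb]
    simp [pvPrefixLoopA, pvSideLoopA_eq, hm, h1c, h2c, h3c, h4c, h5c, h6c, h7c, h8c, h9c, h10c, h11c, h12c]
  -- no prefix matched: A falls through, Bs fold stays none
  · simp only [Bool.not_eq_true] at h1 h2 h3 h4 h5 h6 h7 h8 h9 h10 h11 h12
    have hb : pvFoldBest s (PySem.Dict.items OBJECT_PREFIX_MESSAGES) none = none := by
      rw [pvHitems]
      exact pvFoldBest_id s _ none (by intro kv hkv; fin_cases hkv <;> assumption)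
    have h1c := h1; simp at h1c
    have h2c := h2; simp at h2c
    have h3c := h3; simp at h3c
    have h4c := h4; simp at h4c
    have h5c := h5; simp at h5c
    have h6c := h6; simp at h6c
    have h7c := h7; simp at h7c
    have h8c := h8; simp at h8c
    have h9c := h9; simp at h9c
    have h10c := h10; simp at h10c
    have h11c := h11; simp at h11c
    have h12c := h12; simp at h12c
    unfold parse_object_label parse_object_label_alt
    rw [pvHsorted, hb]
    simp [pvPrefixLoopA, h1c, h2c, h3c, h4c, h5c, h6c, h7c, h8c, h9c, h10c, h11c, h12c]
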